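-- pv_equiv track=rewrite | github.com/Ryno2390/PRSM | prsm/compute/agents/prompters/prompt_optimizer.py | _generate_safety_recommendations
-- ===== SOURCE A (Python) =====
-- from typing import Dict, List, Optional, Any, Tuple
--
-- def _generate_safety_recommendations(violations: List[Dict[str, Any]]) -> List[str]:
--     """Generate safety recommendations based on detected violations"""
--
--     recommendations = []
--
--     violation_types = set(v["type"] for v in violations)
--
--     if "prompt_injection" in violation_types:
--         recommendations.append("Remove instructions that attempt to override system prompts")
--         recommendations.append("Use clear, direct language without manipulation attempts")
--
--     if "jailbreak_attempts" in violation_types: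
--         recommendations.append("Avoid roleplaying scenarios that bypass AI safety guidelines")
--         recommendations.append("Focus on legitimate use cases and honest requests")
--
--     if "information_extraction" in violation_types:
--         recommendations.append("Request public information only")
--         recommendations.append("Respect system boundaries and confidentiality")
--
--     if "harmful_content_generation" in violation_types:
--         recommendations.append("Ensure all requests are for constructive, helpful purposes")
--         recommendations.append("Avoid requesting potentially harmful or dangerous information")
--
--     if not recommendations:
--         recommendations.append("Prompt appears safe - no specific recommendations needed")
--
--     return recommendations
-- ===== SOURCE B (Python) =====
-- _BIT_OF_TYPE = {
--     "prompt_injection": 1,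
--     "jailbreak_attempts": 2,
--     "information_extraction": 4,
--     "harmful_content_generation": 8,
-- }
--
-- _RECOMMENDATION_TEXTS = [
--     "Remove instructions that attempt to override system prompts",
--     "Use clear, direct language without manipulation attempts",
--     "Avoid roleplaying scenarios that bypass AI safety guidelines",
--     "Focus on legitimate use cases and honest requests",
--     "Request public information only",
--     "Respect system boundaries and confidentiality",
--     "Ensure all requests are for constructive, helpful purposes",
--     "Avoid requesting potentially harmful or dangerous information",
-- ]
--
-- def _generate_safety_recommendations(violations):
--     mask = 0
--     for v in violations:
--         mask |= _BIT_OF_TYPE.get(v["type"], 0)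
--     if mask == 0:
--         return ["Prompt appears safe - no specific recommendations needed"]
--     return [s for i, s in enumerate(_RECOMMENDATION_TEXTS) if mask >> (i // 2) & 1]
-- ===== Notes on version B (the rewrite author's own statement) =====
-- stated objective: alternative
-- what changed: Instead of building a set of types and testing four fixed memberships, B folds the violations once into a bitmask (OR of per-type bits) and decodes it by one filtered pass over a flat list of the eight recommendation strings.
import Mathlib
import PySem

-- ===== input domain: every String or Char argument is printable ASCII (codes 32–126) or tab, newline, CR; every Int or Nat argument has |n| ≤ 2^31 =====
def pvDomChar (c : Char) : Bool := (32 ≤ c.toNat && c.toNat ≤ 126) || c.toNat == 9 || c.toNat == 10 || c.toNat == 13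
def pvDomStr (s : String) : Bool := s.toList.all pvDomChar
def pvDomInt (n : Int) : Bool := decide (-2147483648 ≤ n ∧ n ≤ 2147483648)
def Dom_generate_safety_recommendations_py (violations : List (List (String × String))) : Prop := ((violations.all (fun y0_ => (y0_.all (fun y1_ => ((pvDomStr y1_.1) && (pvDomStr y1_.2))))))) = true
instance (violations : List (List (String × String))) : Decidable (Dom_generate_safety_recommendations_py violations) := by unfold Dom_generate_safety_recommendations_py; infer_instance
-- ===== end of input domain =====

-- B replaces A's set-building plus four fixed membership/append blocks by a single
-- fold accumulating a bitmask over the violations, decoded by one filtered pass over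
-- a flat list of the eight recommendation strings; objective: alternative.

-- ===== PORT A =====
-- v["type"]: first-match lookup; exact under Pre_ (key "type" present in every entry)
def pvTypeOf (v : List (String × String)) : String :=
  PySem.Dict.getD (PySem.Dict.mk v) "type" ""

def generate_safety_recommendations_py (violations : List (List (String × String))) : List String :=
  let violation_types : PySem.Set String := PySem.Set.ofList (violations.map pvTypeOf)
  let recommendations : List String := []
  let recommendations :=
    if PySem.Set.contains violation_types "prompt_injection" then
      recommendations ++ ["Remove instructions that attempt to override system prompts",
                          "Use clear, direct language without manipulation attempts"]
    else recommendations
  let recommendations :=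
    if PySem.Set.contains violation_types "jailbreak_attempts" then
      recommendations ++ ["Avoid roleplaying scenarios that bypass AI safety guidelines",
                          "Focus on legitimate use cases and honest requests"]
    else recommendations
  let recommendations :=
    if PySem.Set.contains violation_types "information_extraction" then
      recommendations ++ ["Request public information only",
                          "Respect system boundaries and confidentiality"]
    else recommendations
  let recommendations :=
    if PySem.Set.contains violation_types "harmful_content_generation" then
      recommendations ++ ["Ensure all requests are for constructive, helpful purposes",
                          "Avoid requesting potentially harmful or dangerous information"]
    else recommendations
  if recommendations.isEmpty then
    recommendations ++ ["Prompt appears safe - no specific recommendations needed"]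
  else recommendations

-- ===== PORT B =====
def pvBitOfType : PySem.Dict String Nat :=
  PySem.Dict.mk [("prompt_injection", 1), ("jailbreak_attempts", 2),
                 ("information_extraction", 4), ("harmful_content_generation", 8)]

def pvRecTexts : List String :=
  ["Remove instructions that attempt to override system prompts",
   "Use clear, direct language without manipulation attempts",
   "Avoid roleplaying scenarios that bypass AI safety guidelines",
   "Focus on legitimate use cases and honest requests",
   "Request public information only",
   "Respect system boundaries and confidentiality",
   "Ensure all requests are for constructive, helpful purposes",
   "Avoid requesting potentially harmful or dangerous information"]

-- mask in Source B is a nonnegative int (an or of bits); ported as Nat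
def generate_safety_recommendations_py_alt (violations : List (List (String × String))) : List String :=
  let mask : Nat :=
    violations.foldl (fun m v => m ||| PySem.Dict.getD pvBitOfType (pvTypeOf v) 0) 0
  if mask == 0 then
    ["Prompt appears safe - no specific recommendations needed"]
  else
    ((PySem.List.enumerate pvRecTexts).filter
      (fun p => ((mask >>> (PySem.Int.floordiv p.1 2).toNat) &&& 1) == 1)).map (·.2)

-- ===== PRECONDITION & SPEC =====
-- Pre_ excludes exactly the inputs where A raises KeyError: an entry without a "type" key.
def Pre_generate_safety_recommendations_py (violations : List (List (String × String))) : Prop :=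
  (violations.all (fun v => PySem.Dict.contains (PySem.Dict.mk v) "type")) = true
instance (violations : List (List (String × String))) : Decidable (Pre_generate_safety_recommendations_py violations) := by unfold Pre_generate_safety_recommendations_py; infer_instance

def pvWitness_generate_safety_recommendations_py : (List (List (String × String))) :=
  [[("type", "prompt_injection")], [("type", "other")]]

def Spec_generate_safety_recommendations_py (violations : List (List (String × String))) (out : List String) : Prop := out = generate_safety_recommendations_py_alt violations
instance (violations : List (List (String × String))) (out : List String) : Decidable (Spec_generate_safety_recommendations_py violations out) := by unfold Spec_generate_safety_recommendations_py; infer_instance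

-- ===== CLAIM (what is proved, stated in full; the proofs are below) =====
def Claim_equal_generate_safety_recommendations_py : Prop := ∀ (violations : List (List (String × String))), Dom_generate_safety_recommendations_py violations → Pre_generate_safety_recommendations_py violations → Spec_generate_safety_recommendations_py violations (generate_safety_recommendations_py violations)

-- ===== LEMMAS AND PROOFS =====

-- the mask value determined by which of the four types are present
def pvM (b1 b2 b3 b4 : Bool) : Nat :=
  (cond b1 1 0) ||| (cond b2 2 0) ||| (cond b3 4 0) ||| (cond b4 8 0)

lemma pv_lor_absorb (a k x y : Nat) (h : k ||| x = y) : (a ||| k) ||| x = a ||| y := by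
  rw [Nat.lor_assoc, h]

lemma pv_bit1 : ∀ b1 b2 b3 b4 : Bool, 1 ||| pvM b1 b2 b3 b4 = pvM true b2 b3 b4 := by decide
lemma pv_bit2 : ∀ b1 b2 b3 b4 : Bool, 2 ||| pvM b1 b2 b3 b4 = pvM b1 true b3 b4 := by decide
lemma pv_bit3 : ∀ b1 b2 b3 b4 : Bool, 4 ||| pvM b1 b2 b3 b4 = pvM b1 b2 true b4 := by decide
lemma pv_bit4 : ∀ b1 b2 b3 b4 : Bool, 8 ||| pvM b1 b2 b3 b4 = pvM b1 b2 b3 true := by decide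

lemma pv_mask_char (ts : List String) : ∀ a : Nat,
    ts.foldl (fun m t => m ||| PySem.Dict.getD pvBitOfType t 0) a
      = a ||| pvM (ts.contains "prompt_injection") (ts.contains "jailbreak_attempts")
                (ts.contains "information_extraction") (ts.contains "harmful_content_generation") := by
  induction ts with
  | nil => intro a; simp [pvM]
  | cons t ts ih =>
    intro a
    simp only [List.foldl_cons, ih, List.contains_cons]
    by_cases h1 : t = "prompt_injection"
    · subst h1; simp only [PySem.Dict.getD, pvBitOfType, PySem.Dict.get?]
      norm_num
      exact pv_lor_absorb _ _ _ _ (pv_bit1 _ _ _ _)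
    by_cases h2 : t = "jailbreak_attempts"
    · subst h2; simp only [PySem.Dict.getD, pvBitOfType, PySem.Dict.get?]
      norm_num
      exact pv_lor_absorb _ _ _ _ (pv_bit2 _ _ _ _)
    by_cases h3 : t = "information_extraction"
    · subst h3; simp only [PySem.Dict.getD, pvBitOfType, PySem.Dict.get?]
      norm_num
      exact pv_lor_absorb _ _ _ _ (pv_bit3 _ _ _ _)
    by_cases h4 : t = "harmful_content_generation"
    · subst h4; simp only [PySem.Dict.getD, pvBitOfType, PySem.Dict.get?]
      norm_num
      exact pv_lor_absorb _ _ _ _ (pv_bit4 _ _ _ _)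
    · have b1 : ("prompt_injection" == t) = false := beq_eq_false_iff_ne.mpr (Ne.symm h1)
      have b2 : ("jailbreak_attempts" == t) = false := beq_eq_false_iff_ne.mpr (Ne.symm h2)
      have b3 : ("information_extraction" == t) = false := beq_eq_false_iff_ne.mpr (Ne.symm h3)
      have b4 : ("harmful_content_generation" == t) = false := beq_eq_false_iff_ne.mpr (Ne.symm h4)
      have g0 : PySem.Dict.getD pvBitOfType t 0 = 0 := by
        simp [PySem.Dict.getD, PySem.Dict.get?, pvBitOfType, List.find?, b1, b2, b3, b4]
      simp [g0, b1, b2, b3, b4]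

-- A's tail as a function of the four membership booleans
def pvAFinal (b1 b2 b3 b4 : Bool) : List String :=
  let r : List String := []
  let r := if b1 then r ++ ["Remove instructions that attempt to override system prompts",
                            "Use clear, direct language without manipulation attempts"] else r
  let r := if b2 then r ++ ["Avoid roleplaying scenarios that bypass AI safety guidelines",
                            "Focus on legitimate use cases and honest requests"] else r
  let r := if b3 then r ++ ["Request public information only",
                            "Respect system boundaries and confidentiality"] else r
  let r := if b4 then r ++ ["Ensure all requests are for constructive, helpful purposes",
                            "Avoid requesting potentially harmful or dangerous information"] else r
  if r.isEmpty then r ++ ["Prompt appears safe - no specific recommendations needed"] else r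

-- B's tail as a function of the mask
def pvBFinal (mask : Nat) : List String :=
  if mask == 0 then
    ["Prompt appears safe - no specific recommendations needed"]
  else
    ((PySem.List.enumerate pvRecTexts).filter
      (fun p => ((mask >>> (PySem.Int.floordiv p.1 2).toNat) &&& 1) == 1)).map (·.2)

lemma pv_final_eq : ∀ b1 b2 b3 b4 : Bool, pvBFinal (pvM b1 b2 b3 b4) = pvAFinal b1 b2 b3 b4 := by
  decide

lemma pv_contains_ofList (ts : List String) (x : String) :
    PySem.Set.contains (PySem.Set.ofList ts) x = ts.contains x := by
  by_cases h : x ∈ ts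
  · simp [PySem.Set.contains, PySem.Set.mem_ofList, h]
  · simp [PySem.Set.contains, PySem.Set.mem_ofList, h]

-- ===== VERDICT (by name: the statement is the Claim_ definition above) =====
theorem generate_safety_recommendations_py_spec : Claim_equal_generate_safety_recommendations_py := by
  intro violations _ _
  unfold Spec_generate_safety_recommendations_py
  have hA : generate_safety_recommendations_py violations
      = pvAFinal
          (PySem.Set.contains (PySem.Set.ofList (violations.map pvTypeOf)) "prompt_injection")
          (PySem.Set.contains (PySem.Set.ofList (violations.map pvTypeOf)) "jailbreak_attempts")
          (PySem.Set.contains (PySem.Set.ofList (violations.map pvTypeOf)) "information_extraction")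
          (PySem.Set.contains (PySem.Set.ofList (violations.map pvTypeOf)) "harmful_content_generation") := rfl
  have hB : generate_safety_recommendations_py_alt violations
      = pvBFinal (violations.foldl (fun m v => m ||| PySem.Dict.getD pvBitOfType (pvTypeOf v) 0) 0) := rfl
  have hmap : List.foldl (fun m v => m ||| PySem.Dict.getD pvBitOfType (pvTypeOf v) 0) 0 violations
      = List.foldl (fun m t => m ||| PySem.Dict.getD pvBitOfType t 0) 0 (violations.map pvTypeOf) :=
    (@List.foldl_map _ _ _ pvTypeOf (fun m t => m ||| PySem.Dict.getD pvBitOfType t 0) violations 0).symm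
  rw [hA, hB, hmap, pv_mask_char (violations.map pvTypeOf) 0, Nat.zero_or]
  simp only [pv_contains_ofList]
  exact (pv_final_eq _ _ _ _).symm
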